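-- pv_equiv track=rewrite | github.com/DoctorN8/gse-telemetry-control-simulator | rag/rag_assistant.py | _extract_procedure
-- ===== SOURCE A (Python) =====
-- def _extract_procedure(context: str, procedure_name: str) -> str:
--     lines = context.split('\n')
--     in_procedure = False
--     procedure_lines = []
--
--     for line in lines:
--         if procedure_name.lower() in line.lower():
--             in_procedure = True
--
--         if in_procedure:
--             procedure_lines.append(line)
--
--             if line.startswith('##') and len(procedure_lines) > 5:
--                 break
--
--     if procedure_lines:
--         return '\n'.join(procedure_lines).strip()
--
--     return context[:1000] + "..." if len(context) > 1000 else context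
-- ===== SOURCE B (Python) =====
-- def _extract_procedure(context: str, procedure_name: str) -> str:
--     lines = context.split('\n')
--     needle = procedure_name.lower()
--
--     start = next((i for i, l in enumerate(lines) if needle in l.lower()), None)
--     if start is None:
--         return context[:1000] + "..." if len(context) > 1000 else context
--
--     stop = next((j for j, l in enumerate(lines[start + 5:]) if l.startswith('##')), None)
--     seg = lines[start:] if stop is None else lines[start:start + 5 + stop + 1]
--     return '\n'.join(seg).strip()
-- ===== Notes on version B (the rewrite author's own statement) =====
-- stated objective: alternative
-- what changed: Replaced A's single flag-carrying accumulate-and-break loop by two index searches (first matching line, then first '##' line at offset >= 5) and one slice, with no accumulator or state flag.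
import Mathlib
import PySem

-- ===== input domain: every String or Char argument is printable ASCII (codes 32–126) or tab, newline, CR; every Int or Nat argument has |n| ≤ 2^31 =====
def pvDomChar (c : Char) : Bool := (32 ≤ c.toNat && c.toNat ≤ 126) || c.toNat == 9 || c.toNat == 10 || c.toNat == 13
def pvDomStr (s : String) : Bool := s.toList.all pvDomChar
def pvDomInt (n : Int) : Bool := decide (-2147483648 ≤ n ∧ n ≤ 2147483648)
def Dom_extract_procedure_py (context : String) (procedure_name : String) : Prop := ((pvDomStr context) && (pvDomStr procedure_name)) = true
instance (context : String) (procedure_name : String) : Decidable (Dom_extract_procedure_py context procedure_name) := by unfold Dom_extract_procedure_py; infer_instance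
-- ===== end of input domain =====

-- B replaces A's flag-carrying accumulate-and-break loop by two index searches and one slice (objective: alternative, same cost).
-- Both ports work on List Char (PySem.Chars), exact for the Python string operations used.

-- ===== PORT A =====
-- the `for line in lines` loop with its `in_procedure` flag, accumulator and break
def pvLoopA (pl : List Char) : List (List Char) → Bool → List (List Char) → List (List Char)
  | [], _, acc => acc
  | line :: rest, inProc, acc =>
    let inProc := inProc || PySem.Chars.isIn pl (PySem.Chars.lower line)
    if inProc then
      let acc := acc ++ [line]
      if PySem.Chars.startswith line ['#', '#'] && decide (acc.length > 5) then acc  -- break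
      else pvLoopA pl rest inProc acc
    else pvLoopA pl rest inProc acc

def extract_procedure_py (context : String) (procedure_name : String) : String :=
  let lines := PySem.Chars.splitOn context.toList ['\n']
  let procedureLines := pvLoopA (PySem.Chars.lower procedure_name.toList) lines false []
  if procedureLines ≠ [] then
    String.ofList (PySem.Chars.strip (PySem.Chars.join ['\n'] procedureLines))
  else if context.toList.length > 1000 then
    -- context[:1000] + "..." : slice then concatenation, on the char list (exact)
    String.ofList (PySem.Chars.slice context.toList none (some 1000) ++ ['.', '.', '.'])
  else context

-- ===== PORT B =====
def extract_procedure_py_alt (context : String) (procedure_name : String) : String :=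
  let lines := PySem.Chars.splitOn context.toList ['\n']
  let needle := PySem.Chars.lower procedure_name.toList
  match lines.findIdx? (fun l => PySem.Chars.isIn needle (PySem.Chars.lower l)) with
  | none =>
    if context.toList.length > 1000 then
      String.ofList (PySem.Chars.slice context.toList none (some 1000) ++ ['.', '.', '.'])
    else context
  | some start =>
    let seg :=
      match (lines.drop (start + 5)).findIdx? (fun l => PySem.Chars.startswith l ['#', '#']) with
      | none => lines.drop start
      | some stop => (lines.drop start).take (5 + stop + 1)
    String.ofList (PySem.Chars.strip (PySem.Chars.join ['\n'] seg))

-- ===== PRECONDITION & SPEC =====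
def Spec_extract_procedure_py (context : String) (procedure_name : String) (out : String) : Prop := out = extract_procedure_py_alt context procedure_name
instance (context : String) (procedure_name : String) (out : String) : Decidable (Spec_extract_procedure_py context procedure_name out) := by unfold Spec_extract_procedure_py; infer_instance

-- ===== CLAIM (what is proved, stated in full; the proofs are below) =====
def Claim_equal_extract_procedure_py : Prop := ∀ (context : String) (procedure_name : String), Dom_extract_procedure_py context procedure_name → Spec_extract_procedure_py context procedure_name (extract_procedure_py context procedure_name)

-- ===== LEMMAS AND PROOFS =====

-- proof-level intermediate: what A's loop still appends once the flag is up, as a function of the count so far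
def pvCollect : List (List Char) → Nat → List (List Char)
  | [], _ => []
  | line :: rest, n =>
    if PySem.Chars.startswith line ['#', '#'] && decide (n ≥ 5) then [line]
    else line :: pvCollect rest (n + 1)

theorem pvLoopA_true (pl : List Char) (rest : List (List Char)) (acc : List (List Char)) :
    pvLoopA pl rest true acc = acc ++ pvCollect rest acc.length := by
  induction rest generalizing acc with
  | nil => simp [pvLoopA, pvCollect]
  | cons l t ih =>
    rw [pvLoopA, pvCollect]
    by_cases hp : PySem.Chars.startswith l ['#', '#'] = true
    · by_cases h5 : 5 ≤ acc.length
      · have hg : (acc ++ [l]).length > 5 := by simp; omega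
        simp [hp, h5]
      · have hg : ¬ ((acc ++ [l]).length > 5) := by simp; omega
        simp only [Bool.true_or, if_true, hp, hg, decide_eq_false h5, Bool.and_false, Bool.false_eq_true, if_false, ih]
        simp
    · simp only [Bool.true_or, if_true, Bool.not_eq_true] at *
      simp only [hp, Bool.false_and, Bool.false_eq_true, if_false, ih]
      simp

theorem pvCollect_eq (rest : List (List Char)) (n : Nat) :
    pvCollect rest n =
      match (rest.drop (5 - n)).findIdx? (fun l => PySem.Chars.startswith l ['#', '#']) with
      | none => rest
      | some j => rest.take (5 - n + j + 1) := by
  induction rest generalizing n with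
  | nil => simp [pvCollect]
  | cons l t ih =>
    by_cases hn : n ≥ 5
    · have h0 : 5 - n = 0 := by omega
      have h0' : 5 - (n + 1) = 0 := by omega
      rw [pvCollect, h0]
      by_cases hp : PySem.Chars.startswith l ['#', '#'] = true
      · simp [hp, hn, List.findIdx?_cons]
      · simp only [Bool.not_eq_true] at hp
        simp only [hp, Bool.false_and, Bool.false_eq_true, if_false, List.drop_zero,
          List.findIdx?_cons, ih (n + 1), h0', Option.map]
        cases hfind : t.findIdx? (fun l => PySem.Chars.startswith l ['#', '#']) with
        | none => simp
        | some j => simp [List.take_succ_cons]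
    · have hk : 5 - n = (5 - (n + 1)) + 1 := by omega
      rw [pvCollect, if_neg (by simp; omega), ih (n + 1), hk]
      simp only [List.drop_succ_cons]
      cases hfind : (t.drop (5 - (n + 1))).findIdx? (fun l => PySem.Chars.startswith l ['#', '#']) with
      | none => simp
      | some j =>
        simp only [List.take_succ_cons]
        congr 2
        omega

theorem pvLoopA_false (pl : List Char) (lines : List (List Char)) :
    pvLoopA pl lines false [] =
      match lines.findIdx? (fun l => PySem.Chars.isIn pl (PySem.Chars.lower l)) with
      | none => []
      | some i => pvCollect (lines.drop i) 0 := by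
  induction lines with
  | nil => simp [pvLoopA]
  | cons l t ih =>
    by_cases hm : PySem.Chars.isIn pl (PySem.Chars.lower l) = true
    · rw [pvLoopA]
      simp only [Bool.false_or, hm, if_true, List.nil_append]
      rw [if_neg (by simp), pvLoopA_true]
      simp only [List.findIdx?_cons, hm]
      simp only [if_pos trivial, List.drop_zero, pvCollect]
      rw [if_neg (by simp)]
      simp
    · simp only [Bool.not_eq_true] at hm
      rw [pvLoopA]
      simp only [Bool.false_or, hm, Bool.false_eq_true, if_false, ih,
        List.findIdx?_cons]
      cases hfind : t.findIdx? (fun l => PySem.Chars.isIn pl (PySem.Chars.lower l)) with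
      | none => simp [Option.map]
      | some i => simp [Option.map]

theorem pvCollect_cons_ne_nil (l : List Char) (t : List (List Char)) (n : Nat) :
    pvCollect (l :: t) n ≠ [] := by
  rw [pvCollect]
  split <;> simp

-- ===== VERDICT (by name: the statement is the Claim_ definition above) =====
theorem extract_procedure_py_spec : Claim_equal_extract_procedure_py := by
  intro context procedure_name _
  unfold Spec_extract_procedure_py
  simp only [extract_procedure_py, extract_procedure_py_alt]
  rw [pvLoopA_false]
  cases hfind : (PySem.Chars.splitOn context.toList ['\n']).findIdx?
      (fun l => PySem.Chars.isIn (PySem.Chars.lower procedure_name.toList) (PySem.Chars.lower l)) with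
  | none => simp
  | some i =>
    have hi : i < (PySem.Chars.splitOn context.toList ['\n']).length :=
      (List.findIdx?_eq_some_iff_findIdx_eq.mp hfind).1
    have hd : (PySem.Chars.splitOn context.toList ['\n']).drop i
        = (PySem.Chars.splitOn context.toList ['\n'])[i] ::
          (PySem.Chars.splitOn context.toList ['\n']).drop (i + 1) :=
      (List.getElem_cons_drop hi).symm
    have hne : pvCollect ((PySem.Chars.splitOn context.toList ['\n']).drop i) 0 ≠ [] := by
      rw [hd]; exact pvCollect_cons_ne_nil _ _ 0
    dsimp only
    rw [if_pos hne, pvCollect_eq]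
    have hdd : ((PySem.Chars.splitOn context.toList ['\n']).drop i).drop 5
        = (PySem.Chars.splitOn context.toList ['\n']).drop (i + 5) := by
      rw [List.drop_drop]
    simp only [Nat.sub_zero, hdd]
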